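-- pv_equiv track=rewrite | github.com/anuk909/SpecGen-Artifact | specgen.py | spec_mutator_random
-- ===== SOURCE A (Python) =====
-- def mutate_token_list_random(token_list, has_forall, dont_mutate_logical):
--     res_list = []
--     token_variant_list = []
--     if len(token_list) == 0:
--         return [[""]]
--     if token_list[0].find("\\forall") != -1 or token_list[0].find("\\exists") != -1:
--         dont_mutate_logical = True
--         tmp_str = token_list[0]
--         token_variant_list.append(tmp_str.replace("forall", "exists"))
--         token_variant_list.append(tmp_str.replace("exists", "forall"))
--     elif token_list[0] == "&&" or token_list[0] == "||":
--         if dont_mutate_logical: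
--             token_variant_list = [token_list[0]]
--         else:
--             token_variant_list = ["&&", "||"]
--         if has_forall:
--             dont_mutate_logical = False
--     elif token_list[0] == "<=":
--         token_variant_list = ["<", "<=", "- 1 <="]
--     elif token_list[0] == ">=":
--         token_variant_list = [">", ">=", "+ 1 >="]
--     elif token_list[0] == "<":
--         token_variant_list = ["<", "<="]
--     elif token_list[0] == ">":
--         token_variant_list = [">", ">="]
--     elif not has_forall and (token_list[0] == "+" or token_list[0] == "-"):
--         token_variant_list = ["+", "-"]
--     else:
--         token_variant_list = [token_list[0]]
--     for variant in token_variant_list: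
--         for res in mutate_token_list_random(
--             token_list[1:], has_forall, dont_mutate_logical
--         ):
--             tmp_list = [variant]
--             tmp_list.extend(res)
--             res_list.append(tmp_list)
--     return res_list
--
-- def spec_mutator_random(line):
--     res_list = []
--     has_forall = line.find("forall") != -1 or line.find("exists") != -1
--     res_token_list_list = mutate_token_list_random(line.split(" "), has_forall, True)
--     for token_list in res_token_list_list:
--         tmp_str = ""
--         for token in token_list:
--             tmp_str = tmp_str + token + " "
--         res_list.append(tmp_str)
--     return res_list
-- ===== SOURCE B (Python) =====
-- def smr_step(tok, has_forall, flag):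
--     # per-token (variant list, next flag) for the one-pass scan
--     if "\\forall" in tok or "\\exists" in tok:
--         return [tok.replace("forall", "exists"), tok.replace("exists", "forall")], True
--     if tok == "&&" or tok == "||":
--         return ([tok] if flag else ["&&", "||"]), (False if has_forall else flag)
--     if tok == "<=":
--         return ["<", "<=", "- 1 <="], flag
--     if tok == ">=":
--         return [">", ">=", "+ 1 >="], flag
--     if tok == "<":
--         return ["<", "<="], flag
--     if tok == ">":
--         return [">", ">="], flag
--     if not has_forall and (tok == "+" or tok == "-"):
--         return ["+", "-"], flag
--     return [tok], flag
--
--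
-- def spec_mutator_random(line):
--     has_forall = "forall" in line or "exists" in line
--     variant_lists = []
--     flag = True
--     for tok in line.split(" "):
--         vl, flag = smr_step(tok, has_forall, flag)
--         variant_lists.append(vl)
--     combos = [[]]
--     for vl in variant_lists:
--         combos = [c + [v] for c in combos for v in vl]
--     return ["".join(v + " " for v in combo) + " " for combo in combos]
-- ===== Notes on version B (the rewrite author's own statement) =====
-- stated objective: alternative
-- what changed: Replaces A's recursion over token suffixes (re-branching per suffix inside a double append loop) by a single left-to-right pass that collects one variant list per token while threading the dont-mutate flag, followed by an iterative Cartesian product and a join per combination.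
import Mathlib
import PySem

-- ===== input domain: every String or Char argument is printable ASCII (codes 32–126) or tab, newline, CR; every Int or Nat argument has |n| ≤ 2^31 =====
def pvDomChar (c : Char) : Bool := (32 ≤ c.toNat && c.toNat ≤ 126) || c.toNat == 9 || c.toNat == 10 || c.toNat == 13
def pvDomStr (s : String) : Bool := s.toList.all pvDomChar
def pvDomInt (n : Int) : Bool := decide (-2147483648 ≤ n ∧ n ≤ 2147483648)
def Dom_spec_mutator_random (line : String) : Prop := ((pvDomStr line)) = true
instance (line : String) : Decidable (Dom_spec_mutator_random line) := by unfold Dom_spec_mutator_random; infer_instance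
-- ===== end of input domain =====

-- B replaces A's recursion over token suffixes by one pass computing per-token variant
-- lists followed by an iterative Cartesian product (objective: alternative decomposition).

-- ===== PORT A =====
def mutate_token_list_random (token_list : List String) (has_forall dont_mutate_logical : Bool) : List (List String) :=
  match token_list with
  | [] => [[""]]
  | t :: rest =>
    -- the if/elif chain computing (token_variant_list, updated dont_mutate_logical)
    let p : List String × Bool :=
      if PySem.Str.find t "\\forall" ≠ -1 ∨ PySem.Str.find t "\\exists" ≠ -1 then
        ([PySem.Str.replace t "forall" "exists", PySem.Str.replace t "exists" "forall"], true)
      else if t = "&&" ∨ t = "||" then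
        ((if dont_mutate_logical then [t] else ["&&", "||"]),
         if has_forall then false else dont_mutate_logical)
      else if t = "<=" then (["<", "<=", "- 1 <="], dont_mutate_logical)
      else if t = ">=" then ([">", ">=", "+ 1 >="], dont_mutate_logical)
      else if t = "<" then (["<", "<="], dont_mutate_logical)
      else if t = ">" then ([">", ">="], dont_mutate_logical)
      else if ¬ has_forall = true ∧ (t = "+" ∨ t = "-") then (["+", "-"], dont_mutate_logical)
      else ([t], dont_mutate_logical)
    -- for variant in token_variant_list: for res in mutate(rest,…): res_list.append([variant]+res)
    p.1.foldl (fun acc variant =>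
      (mutate_token_list_random rest has_forall p.2).foldl
        (fun acc2 res => acc2 ++ [variant :: res]) acc) []

def spec_mutator_random (line : String) : List String :=
  let has_forall : Bool :=
    decide (PySem.Str.find line "forall" ≠ -1 ∨ PySem.Str.find line "exists" ≠ -1)
  let res_token_list_list :=
    mutate_token_list_random ((PySem.Str.split? line " ").getD []) has_forall true
  res_token_list_list.foldl (fun acc token_list =>
    acc ++ [token_list.foldl (fun s tok => s ++ tok ++ " ") ""]) []

-- ===== PORT B =====
-- per-token (variant list, next flag); Source B's smr_step
def smr_step (tok : String) (has_forall flag : Bool) : List String × Bool :=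
  if PySem.Str.isIn "\\forall" tok ∨ PySem.Str.isIn "\\exists" tok then
    ([PySem.Str.replace tok "forall" "exists", PySem.Str.replace tok "exists" "forall"], true)
  else if tok = "&&" ∨ tok = "||" then
    ((if flag then [tok] else ["&&", "||"]), (if has_forall then false else flag))
  else if tok = "<=" then (["<", "<=", "- 1 <="], flag)
  else if tok = ">=" then ([">", ">=", "+ 1 >="], flag)
  else if tok = "<" then (["<", "<="], flag)
  else if tok = ">" then ([">", ">="], flag)
  else if ¬ has_forall = true ∧ (tok = "+" ∨ tok = "-") then (["+", "-"], flag)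
  else ([tok], flag)

def spec_mutator_random_alt (line : String) : List String :=
  let has_forall : Bool := PySem.Str.isIn "forall" line || PySem.Str.isIn "exists" line
  -- one pass: collect the variant list of every token, threading the flag
  let variant_lists :=
    (((PySem.Str.split? line " ").getD []).foldl
      (fun (st : List (List String) × Bool) tok =>
        let r := smr_step tok has_forall st.2
        (st.1 ++ [r.1], r.2)) ([], true)).1
  -- iterative Cartesian product, leftmost token varying slowest
  let combos := variant_lists.foldl
    (fun combos vl => combos.flatMap (fun c => vl.map (fun v => c ++ [v]))) [[]]
  combos.map (fun combo => String.join (combo.map (fun v => v ++ " ")) ++ " ")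

-- ===== PRECONDITION & SPEC =====
def Spec_spec_mutator_random (line : String) (out : List String) : Prop := out = spec_mutator_random_alt line
instance (line : String) (out : List String) : Decidable (Spec_spec_mutator_random line out) := by unfold Spec_spec_mutator_random; infer_instance

-- ===== CLAIM (what is proved, stated in full; the proofs are below) =====
def Claim_equal_spec_mutator_random : Prop := ∀ (line : String), Dom_spec_mutator_random line → Spec_spec_mutator_random line (spec_mutator_random line)

-- ===== LEMMAS AND PROOFS =====

-- 'sub in s' and 's.find(sub) != -1' agree
theorem isIn_iff_find_ne (s sub : String) :
    PySem.Str.isIn sub s = true ↔ PySem.Str.find s sub ≠ -1 := by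
  rw [PySem.Str.isIn_iff_infix, PySem.Str.find_ne_neg_one_iff]

-- B's per-token step agrees with the (variants, flag) pair A computes in its if/elif chain
theorem smr_step_eq_A (t : String) (hf f : Bool) :
    smr_step t hf f =
      (if PySem.Str.find t "\\forall" ≠ -1 ∨ PySem.Str.find t "\\exists" ≠ -1 then
        ([PySem.Str.replace t "forall" "exists", PySem.Str.replace t "exists" "forall"], true)
      else if t = "&&" ∨ t = "||" then
        ((if f then [t] else ["&&", "||"]), if hf then false else f)
      else if t = "<=" then (["<", "<=", "- 1 <="], f)
      else if t = ">=" then ([">", ">=", "+ 1 >="], f)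
      else if t = "<" then (["<", "<="], f)
      else if t = ">" then ([">", ">="], f)
      else if ¬ hf = true ∧ (t = "+" ∨ t = "-") then (["+", "-"], f)
      else ([t], f)) := by
  have h1 : (PySem.Str.isIn "\\forall" t = true ∨ PySem.Str.isIn "\\exists" t = true) ↔
      (PySem.Str.find t "\\forall" ≠ -1 ∨ PySem.Str.find t "\\exists" ≠ -1) := by
    rw [isIn_iff_find_ne, isIn_iff_find_ne]
  unfold smr_step
  by_cases h : PySem.Str.isIn "\\forall" t = true ∨ PySem.Str.isIn "\\exists" t = true
  · rw [if_pos h, if_pos (h1.mp h)]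
  · rw [if_neg h, if_neg (fun hc => h (h1.mpr hc))]

-- right-handed Cartesian product (base [[]])
def cartR : List (List String) → List (List String)
  | [] => [[]]
  | vl :: rest => vl.flatMap (fun v => (cartR rest).map (v :: ·))

-- the variant lists B's pass collects, as a recursion threading the flag
def varsRec (toks : List String) (hf f : Bool) : List (List String) :=
  match toks with
  | [] => []
  | t :: ts => (smr_step t hf f).1 :: varsRec ts hf (smr_step t hf f).2

theorem varsRec_spec (toks : List String) (hf : Bool) :
    ∀ (acc : List (List String)) (f : Bool),
      (toks.foldl (fun (st : List (List String) × Bool) tok =>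
        let r := smr_step tok hf st.2
        (st.1 ++ [r.1], r.2)) (acc, f)).1 = acc ++ varsRec toks hf f := by
  induction toks with
  | nil => intro acc f; simp [varsRec]
  | cons t ts ih =>
      intro acc f
      simp only [List.foldl_cons, varsRec]
      rw [ih]
      simp

-- A's double loop is a flatMap/map of the recursive results
theorem mutate_cons (t : String) (ts : List String) (hf f : Bool) :
    mutate_token_list_random (t :: ts) hf f =
      (smr_step t hf f).1.flatMap
        (fun v => (mutate_token_list_random ts hf (smr_step t hf f).2).map (v :: ·)) := by
  rw [smr_step_eq_A]
  conv_lhs => rw [mutate_token_list_random]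
  generalize (if PySem.Str.find t "\\forall" ≠ -1 ∨ PySem.Str.find t "\\exists" ≠ -1 then
        ([PySem.Str.replace t "forall" "exists", PySem.Str.replace t "exists" "forall"], true)
      else if t = "&&" ∨ t = "||" then
        ((if f then [t] else ["&&", "||"]), if hf then false else f)
      else if t = "<=" then (["<", "<=", "- 1 <="], f)
      else if t = ">=" then ([">", ">=", "+ 1 >="], f)
      else if t = "<" then (["<", "<="], f)
      else if t = ">" then ([">", ">="], f)
      else if ¬ hf = true ∧ (t = "+" ∨ t = "-") then (["+", "-"], f)
      else ([t], f)) = p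
  generalize mutate_token_list_random ts hf p.2 = recs
  have inner : ∀ (v : String) (acc : List (List String)),
      recs.foldl (fun acc2 res => acc2 ++ [v :: res]) acc = acc ++ recs.map (v :: ·) :=
    fun v acc => PySem.List.foldl_append_singleton_eq_map (v :: ·) recs acc
  have outer : ∀ (vl : List String) (acc : List (List String)),
      vl.foldl (fun acc variant => recs.foldl (fun acc2 res => acc2 ++ [variant :: res]) acc) acc
        = acc ++ vl.flatMap (fun v => recs.map (v :: ·)) := by
    intro vl
    induction vl with
    | nil => simp
    | cons v vs ih => intro acc; simp [inner, List.append_assoc, List.flatMap_def]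
  simpa using outer p.1 []

-- A's recursion = the right product of varsRec, each list closed by the "" sentinel
theorem mutate_eq_cartR (toks : List String) (hf : Bool) :
    ∀ f, mutate_token_list_random toks hf f
      = (cartR (varsRec toks hf f)).map (· ++ [""]) := by
  induction toks with
  | nil => intro f; simp [mutate_token_list_random, varsRec, cartR]
  | cons t ts ih =>
      intro f
      rw [mutate_cons, ih]
      simp [varsRec, cartR, List.map_flatMap, Function.comp_def]

-- iterative (left-fold) product = right product, generalized over the seed
theorem foldl_cart (vls : List (List String)) :
    ∀ (combos : List (List String)),
      vls.foldl (fun combos vl => combos.flatMap (fun c => vl.map (fun v => c ++ [v]))) combos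
        = combos.flatMap (fun c => (cartR vls).map (c ++ ·)) := by
  induction vls with
  | nil => intro combos; simp [cartR]
  | cons vl rest ih =>
      intro combos
      simp only [List.foldl_cons, ih, cartR]
      simp [List.flatMap_assoc, List.map_flatMap, List.flatMap_map, Function.comp_def,
        List.append_assoc]

-- folding ++ over strings from seed s appends String.join
theorem foldl_app_join : ∀ (l : List String) (s : String), l.foldl (· ++ ·) s = s ++ String.join l := by
  intro l
  induction l with
  | nil => intro s; show s = s ++ "" ; simp
  | cons y ys ih =>
      intro s
      show List.foldl (· ++ ·) (s ++ y) ys = s ++ String.join (y :: ys)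
      rw [ih, show String.join (y :: ys) = List.foldl (· ++ ·) ("" ++ y) ys from rfl, ih]
      simp [String.append_assoc]

theorem join_cons (x : String) (xs : List String) : String.join (x :: xs) = x ++ String.join xs := by
  rw [show String.join (x :: xs) = List.foldl (· ++ ·) ("" ++ x) xs from rfl, foldl_app_join]
  simp

-- string building: A's running concatenation vs B's join of "v ++ ' '"
theorem foldl_join (combo : List String) :
    ∀ s : String, combo.foldl (fun s tok => s ++ tok ++ " ") s
      = s ++ String.join (combo.map (fun v => v ++ " ")) := by
  induction combo with
  | nil => intro s; simp [String.join]
  | cons v vs ih =>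
      intro s
      rw [List.foldl_cons, ih, List.map_cons, join_cons]
      simp [String.append_assoc]

-- has_forall agrees between the two ports
theorem has_forall_eq (line : String) :
    decide (PySem.Str.find line "forall" ≠ -1 ∨ PySem.Str.find line "exists" ≠ -1)
      = (PySem.Str.isIn "forall" line || PySem.Str.isIn "exists" line) := by
  have e1 := isIn_iff_find_ne line "forall"
  have e2 := isIn_iff_find_ne line "exists"
  cases h1 : PySem.Str.isIn "forall" line with
  | true => simp only [Bool.true_or]; exact decide_eq_true (Or.inl (e1.mp h1))
  | false =>
    cases h2 : PySem.Str.isIn "exists" line with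
    | true => simp only [Bool.or_true]; exact decide_eq_true (Or.inr (e2.mp h2))
    | false =>
      simp only [Bool.or_self]
      apply decide_eq_false
      rintro (h | h)
      · exact absurd (h1.symm.trans (e1.mpr h)) Bool.false_ne_true
      · exact absurd (h2.symm.trans (e2.mpr h)) Bool.false_ne_true

-- ===== VERDICT (by name: the statement is the Claim_ definition above) =====
theorem spec_mutator_random_spec : Claim_equal_spec_mutator_random := by
  intro line _
  unfold Spec_spec_mutator_random spec_mutator_random spec_mutator_random_alt
  dsimp only
  rw [has_forall_eq]
  generalize (PySem.Str.isIn "forall" line || PySem.Str.isIn "exists" line) = hf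
  generalize (PySem.Str.split? line " ").getD [] = toks
  rw [mutate_eq_cartR, varsRec_spec toks hf [] true, foldl_cart]
  simp only [List.nil_append, List.flatMap_cons, List.flatMap_nil, List.append_nil,
    List.map_map]
  rw [PySem.List.foldl_append_singleton_eq_map]
  simp only [List.nil_append, List.map_map]
  apply List.map_congr_left
  intro combo _
  simp only [Function.comp_apply]
  rw [List.foldl_append, foldl_join combo ""]
  simp [String.append_assoc]
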